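-- pv_equiv track=rewrite | github.com/iSE-UET-VNU/CLAP | consistent_testing_manager/FPMatricsCaculation.py | concat_slicies
-- ===== SOURCE A (Python) =====
-- from collections import defaultdict
--
-- def concat_slicies(forward_slicies, backward_slicies):
--     both_slicies = defaultdict(dict)
--     for item in forward_slicies:
--         both_slicies[item] = set(forward_slicies[item])
--
--     for item in backward_slicies:
--         if item not in both_slicies:
--             both_slicies[item] = set(backward_slicies[item])
--         else:
--             both_slicies[item].update(backward_slicies[item])
--     return both_slicies
-- ===== SOURCE B (Python) =====
-- from collections import defaultdict
--
-- def concat_slicies(forward_slicies, backward_slicies):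
--     # group raw value lists per key over the flattened item stream, set-ify at the end
--     groups = {}
--     for key, values in list(forward_slicies.items()) + list(backward_slicies.items()):
--         groups.setdefault(key, []).extend(values)
--     both_slicies = defaultdict(dict)
--     for key, values in groups.items():
--         both_slicies[key] = set(values)
--     return both_slicies
-- ===== Notes on version B (the rewrite author's own statement) =====
-- stated objective: alternative
-- what changed: Instead of A's merge of set-valued entries (copy forward sets, then conditionally insert-or-update from backward), B flattens both dicts into one (key, values) item stream, groups the raw value LISTS per key by setdefault(...).extend(...), and only converts each concatenated list to a set in a final pass; the intermediate data structure (lists under concatenation vs sets under union) and the pass structure both differ.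
import Mathlib
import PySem

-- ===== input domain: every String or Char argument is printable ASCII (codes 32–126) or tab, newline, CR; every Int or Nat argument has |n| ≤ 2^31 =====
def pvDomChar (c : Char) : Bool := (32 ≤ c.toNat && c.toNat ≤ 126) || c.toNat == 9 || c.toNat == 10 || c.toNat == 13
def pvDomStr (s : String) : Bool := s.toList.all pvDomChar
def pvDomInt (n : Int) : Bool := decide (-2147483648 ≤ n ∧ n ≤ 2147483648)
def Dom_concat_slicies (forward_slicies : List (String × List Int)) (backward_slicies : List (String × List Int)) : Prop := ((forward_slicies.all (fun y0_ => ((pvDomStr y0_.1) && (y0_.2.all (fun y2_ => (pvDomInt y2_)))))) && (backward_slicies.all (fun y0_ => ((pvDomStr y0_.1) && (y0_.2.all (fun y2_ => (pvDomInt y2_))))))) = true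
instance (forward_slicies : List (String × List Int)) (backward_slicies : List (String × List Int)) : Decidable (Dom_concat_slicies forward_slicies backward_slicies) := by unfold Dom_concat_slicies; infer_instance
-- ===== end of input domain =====

-- B flattens both dicts into one (key, values) item stream, groups the raw value LISTS per
-- key (setdefault + extend), and set-ifies each concatenated list once at the end, instead
-- of A's copy-forward-sets-then-conditionally-insert-or-union merge (objective: alternative).

-- ===== PORT A =====
-- dicts are assoc lists (first-match lookup); dict iteration = first occurrences of the keys,
-- in order (PySem.Set.ofList); a dict of sets is returned as its items list.
def concat_slicies (forward_slicies : List (String × List Int)) (backward_slicies : List (String × List Int)) : List (String × List Int) :=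
  -- both_slicies = defaultdict(dict); for item in forward_slicies: both[item] = set(forward_slicies[item])
  let d1 : PySem.Dict String (PySem.Set Int) :=
    (PySem.Set.ofList (forward_slicies.map (·.1))).foldl
      (fun d k => d.insert k (PySem.Set.ofList ((forward_slicies.lookup k).getD [])))
      PySem.Dict.empty
  -- for item in backward_slicies: if item not in both: both[item] = set(b[item]) else both[item].update(b[item])
  let d2 : PySem.Dict String (PySem.Set Int) :=
    (PySem.Set.ofList (backward_slicies.map (·.1))).foldl
      (fun d k =>
        if !(d.contains k) then
          d.insert k (PySem.Set.ofList ((backward_slicies.lookup k).getD []))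
        else
          d.modify k [] (fun s => PySem.Set.update s ((backward_slicies.lookup k).getD [])))
      d1
  d2.items

-- ===== PORT B =====
-- list(d.items()) of an assoc-list dict: the keys' first occurrences, each with its
-- first-match value (exact for the dict the assoc list represents).
def pvItemsB (l : List (String × List Int)) : List (String × List Int) :=
  (PySem.Set.ofList (l.map (·.1))).map (fun k => (k, (l.lookup k).getD []))

def concat_slicies_alt (forward_slicies : List (String × List Int)) (backward_slicies : List (String × List Int)) : List (String × List Int) :=
  -- groups = {}; for key, values in list(f.items()) + list(b.items()): groups.setdefault(key, []).extend(values)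
  let groups : PySem.Dict String (List Int) :=
    (pvItemsB forward_slicies ++ pvItemsB backward_slicies).foldl
      (fun d p => (d.setdefault p.1 []).modify p.1 [] (fun vs => vs ++ p.2))
      PySem.Dict.empty
  -- both_slicies = defaultdict(dict); for key, values in groups.items(): both[key] = set(values)
  let both : PySem.Dict String (PySem.Set Int) :=
    groups.items.foldl (fun d p => d.insert p.1 (PySem.Set.ofList p.2)) PySem.Dict.empty
  both.items

-- ===== PRECONDITION & SPEC =====
def Spec_concat_slicies (forward_slicies : List (String × List Int)) (backward_slicies : List (String × List Int)) (out : List (String × List Int)) : Prop := out = concat_slicies_alt forward_slicies backward_slicies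
instance (forward_slicies : List (String × List Int)) (backward_slicies : List (String × List Int)) (out : List (String × List Int)) : Decidable (Spec_concat_slicies forward_slicies backward_slicies out) := by unfold Spec_concat_slicies; infer_instance

-- ===== CLAIM (what is proved, stated in full; the proofs are below) =====
def Claim_equal_concat_slicies : Prop := ∀ (forward_slicies : List (String × List Int)) (backward_slicies : List (String × List Int)), Dom_concat_slicies forward_slicies backward_slicies → Spec_concat_slicies forward_slicies backward_slicies (concat_slicies forward_slicies backward_slicies)

-- ===== LEMMAS AND PROOFS =====

-- first-match lookup misses exactly outside the key list
theorem pv_lookup_eq_none {β : Type} (l : List (String × β)) (k : String)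
    (h : k ∉ l.map Prod.fst) : l.lookup k = none := by
  induction l with
  | nil => rfl
  | cons p rest ih =>
    simp only [List.map_cons, List.mem_cons, not_or] at h
    obtain ⟨a, v⟩ := p
    simp only [List.lookup]
    have hne : (k == a) = false := by simpa [beq_iff_eq] using h.1
    rw [hne]
    exact ih h.2

-- the body of A's second loop
def pvStepA (backward_slicies : List (String × List Int))
    (d : PySem.Dict String (PySem.Set Int)) (k : String) : PySem.Dict String (PySem.Set Int) :=
  if !(d.contains k) then
    d.insert k (PySem.Set.ofList ((backward_slicies.lookup k).getD []))
  else
    d.modify k [] (fun s => PySem.Set.update s ((backward_slicies.lookup k).getD []))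

-- what A's second loop does to the items of a nodup-keyed dict, for a nodup key list
theorem pv_loop2 (backward_slicies : List (String × List Int))
    (ks : List String) (hks : ks.Nodup) :
    ∀ (d : PySem.Dict String (PySem.Set Int)), d.keys.Nodup →
    (ks.foldl (pvStepA backward_slicies) d).items =
      d.items.map (fun p => if p.1 ∈ ks then
          (p.1, PySem.Set.update p.2 ((backward_slicies.lookup p.1).getD [])) else p)
      ++ (ks.filter (fun k => !(d.contains k))).map
          (fun k => (k, PySem.Set.ofList ((backward_slicies.lookup k).getD []))) := by
  induction ks with
  | nil => intro d _; simp
  | cons k ks ih =>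
    intro d hd
    have hknotin : k ∉ ks := (List.nodup_cons.mp hks).1
    have hksn : ks.Nodup := (List.nodup_cons.mp hks).2
    simp only [List.foldl_cons]
    by_cases hc : d.contains k = true
    · -- existing key: modify = insert with the updated set
      have hstep : pvStepA backward_slicies d k =
          d.insert k (PySem.Set.update (d.getD k []) ((backward_slicies.lookup k).getD [])) := by
        simp [pvStepA, hc, PySem.Dict.modify]
      rw [hstep, ih hksn _ (PySem.Dict.nodup_keys_insert d k _ hd),
          PySem.Dict.items_insert_of_contains d _ hc,
          List.filter_cons_of_neg (by simp [hc])]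
      congr 1
      · rw [List.map_map]
        apply List.map_congr_left
        intro p hp
        by_cases hpk : p.1 = k
        · have hval : d.getD k [] = p.2 := by
            have : (k, p.2) ∈ d.items := by rw [← hpk]; exact hp
            exact PySem.Dict.getD_of_mem_items d this hd []
          simp [Function.comp, hpk, hknotin, hval]
        · simp [Function.comp, hpk, beq_iff_eq]
      · congr 1
        apply List.filter_congr
        intro x hx
        have hxk : x ≠ k := fun h => hknotin (h ▸ hx)
        rw [PySem.Dict.contains_insert]
        simp [hxk]
    · -- fresh key: insert appends
      have hcf : d.contains k = false := by simpa using hc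
      have hstep : pvStepA backward_slicies d k =
          d.insert k (PySem.Set.ofList ((backward_slicies.lookup k).getD [])) := by
        simp [pvStepA, hcf]
      have hkeys : k ∉ d.items.map Prod.fst := by
        intro hmem
        have : d.contains k = true := by
          rw [PySem.Dict.contains_eq_decide_mem_keys]
          simpa [PySem.Dict.keys] using hmem
        simp [this] at hcf
      have hfilt' : ks.filter (fun x => !(d.insert k (PySem.Set.ofList ((backward_slicies.lookup k).getD []))).contains x)
          = ks.filter (fun x => !(d.contains x)) := by
        apply List.filter_congr
        intro x hx
        have hxk : x ≠ k := fun h => hknotin (h ▸ hx)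
        rw [PySem.Dict.contains_insert]
        simp [hxk]
      have hmapd : d.items.map (fun p => if p.1 ∈ ks then
            (p.1, PySem.Set.update p.2 ((backward_slicies.lookup p.1).getD [])) else p)
          = d.items.map (fun p => if p.1 ∈ k :: ks then
            (p.1, PySem.Set.update p.2 ((backward_slicies.lookup p.1).getD [])) else p) := by
        apply List.map_congr_left
        intro p hp
        have hpk : p.1 ≠ k := by
          intro h
          exact hkeys (h ▸ List.mem_map_of_mem hp)
        simp [List.mem_cons, hpk]
      rw [hstep, ih hksn _ (PySem.Dict.nodup_keys_insert d k _ hd),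
          PySem.Dict.items_insert_of_not_contains d _ hcf,
          List.map_append, hfilt', hmapd,
          List.filter_cons_of_pos (by simp [hcf]), List.append_assoc]
      congr 1
      simp [hknotin]

-- the body of B's grouping loop (setdefault then extend)
def pvStepB (d : PySem.Dict String (List Int)) (p : String × List Int) :
    PySem.Dict String (List Int) :=
  (d.setdefault p.1 []).modify p.1 [] (fun vs => vs ++ p.2)

-- B's grouping step, in insert form
theorem pvStepB_eq (d : PySem.Dict String (List Int)) (p : String × List Int) :
    pvStepB d p = d.insert p.1 (d.getD p.1 [] ++ p.2) := by
  unfold pvStepB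
  by_cases hc : d.contains p.1 = true
  · rw [PySem.Dict.setdefault_of_contains _ _ hc]
    simp [PySem.Dict.modify]
  · have hcf : d.contains p.1 = false := by simpa using hc
    rw [PySem.Dict.setdefault_of_not_contains _ _ hcf]
    simp [PySem.Dict.modify, PySem.Dict.getD_insert_self, PySem.Dict.insert_insert_self,
      PySem.Dict.getD_of_not_contains _ _ hcf]

-- what B's grouping loop does to the items of a nodup-keyed dict,
-- for a pair list with nodup keys
theorem pv_group (ps : List (String × List Int)) (hps : (ps.map Prod.fst).Nodup) :
    ∀ (d : PySem.Dict String (List Int)), d.keys.Nodup →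
    (ps.foldl pvStepB d).items =
      d.items.map (fun q => match ps.lookup q.1 with
          | some vs => (q.1, q.2 ++ vs)
          | none => q)
      ++ ps.filter (fun p => !(d.contains p.1)) := by
  induction ps with
  | nil => intro d _; simp
  | cons p ps ih =>
    intro d hd
    have hknotin : p.1 ∉ ps.map Prod.fst := (List.nodup_cons.mp hps).1
    have hpsn : (ps.map Prod.fst).Nodup := (List.nodup_cons.mp hps).2
    simp only [List.foldl_cons, pvStepB_eq]
    by_cases hc : d.contains p.1 = true
    · rw [ih hpsn _ (PySem.Dict.nodup_keys_insert d p.1 _ hd),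
          PySem.Dict.items_insert_of_contains d _ hc,
          List.filter_cons_of_neg (by simp [hc])]
      congr 1
      · rw [List.map_map]
        apply List.map_congr_left
        intro q hq
        by_cases hqk : q.1 = p.1
        · have hval : d.getD p.1 [] = q.2 := by
            have : (p.1, q.2) ∈ d.items := by rw [← hqk]; exact hq
            exact PySem.Dict.getD_of_mem_items d this hd []
          have hlk : ps.lookup q.1 = none := pv_lookup_eq_none ps q.1 (hqk ▸ hknotin)
          have hlk' : List.lookup p.1 ps = none := hqk ▸ hlk
          simp [Function.comp, hqk, hval, List.lookup, hlk']
        · have : (q.1 == p.1) = false := by simpa [beq_iff_eq] using hqk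
          simp [Function.comp, hqk, List.lookup, this, beq_iff_eq]
      · apply List.filter_congr
        intro x hx
        have hxk : x.1 ≠ p.1 := fun h => hknotin (h ▸ List.mem_map_of_mem hx)
        rw [PySem.Dict.contains_insert]
        simp [hxk]
    · have hcf : d.contains p.1 = false := by simpa using hc
      have hkeys : p.1 ∉ d.items.map Prod.fst := by
        intro hmem
        have : d.contains p.1 = true := by
          rw [PySem.Dict.contains_eq_decide_mem_keys]
          simpa [PySem.Dict.keys] using hmem
        simp [this] at hcf
      have hgd : d.getD p.1 [] = [] := PySem.Dict.getD_of_not_contains _ _ hcf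
      rw [hgd, List.nil_append,
          ih hpsn _ (PySem.Dict.nodup_keys_insert d p.1 _ hd),
          PySem.Dict.items_insert_of_not_contains d _ hcf,
          List.map_append, List.filter_cons_of_pos (by simp [hcf])]
      have hfilt' : ps.filter (fun x => !(d.insert p.1 p.2).contains x.1)
          = ps.filter (fun x => !(d.contains x.1)) := by
        apply List.filter_congr
        intro x hx
        have hxk : x.1 ≠ p.1 := fun h => hknotin (h ▸ List.mem_map_of_mem hx)
        rw [PySem.Dict.contains_insert]
        simp [hxk]
      have hmapd : d.items.map (fun q => match (p :: ps).lookup q.1 with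
            | some vs => (q.1, q.2 ++ vs)
            | none => q)
          = d.items.map (fun q => match ps.lookup q.1 with
            | some vs => (q.1, q.2 ++ vs)
            | none => q) := by
        apply List.map_congr_left
        intro q hq
        have hqk : q.1 ≠ p.1 := fun h => hkeys (h ▸ List.mem_map_of_mem hq)
        have : (q.1 == p.1) = false := by simpa [beq_iff_eq] using hqk
        simp [List.lookup, this]
      have hsingle : [(p.1, p.2)].map (fun q => match ps.lookup q.1 with
            | some vs => (q.1, q.2 ++ vs)
            | none => q) = [p] := by
        have hlk : ps.lookup p.1 = none := pv_lookup_eq_none ps p.1 hknotin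
        simp [hlk]
      rw [hmapd, hsingle, hfilt', List.append_assoc]
      rfl

-- lookup in a key-to-value map is membership
theorem pv_lookup_map {β : Type} (ks : List String) (v : String → β) (x : String) :
    (ks.map (fun k => (k, v k))).lookup x = if x ∈ ks then some (v x) else none := by
  induction ks with
  | nil => simp
  | cons k ks ih =>
    by_cases hxk : x = k
    · simp [List.lookup, hxk]
    · have : (x == k) = false := by simpa [beq_iff_eq] using hxk
      simp [List.lookup, this, hxk, ih]

-- ===== VERDICT (by name: the statement is the Claim_ definition above) =====
theorem concat_slicies_spec : Claim_equal_concat_slicies := by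
  intro f b _
  simp only [Spec_concat_slicies, concat_slicies, concat_slicies_alt]
  have hndfks : List.Nodup (PySem.Set.ofList (f.map (·.1))) := PySem.Set.nodup_ofList _
  have hndbks : List.Nodup (PySem.Set.ofList (b.map (·.1))) := PySem.Set.nodup_ofList _
  -- ---------- A's side ----------
  have h1 : ((PySem.Set.ofList (f.map (·.1))).foldl
        (fun d k => d.insert k (PySem.Set.ofList ((f.lookup k).getD [])))
        (PySem.Dict.empty : PySem.Dict String (PySem.Set Int))).items
      = (PySem.Set.ofList (f.map (·.1))).map
          (fun k => (k, PySem.Set.ofList ((f.lookup k).getD []))) := by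
    have := PySem.Dict.items_foldl_insert_fresh (PySem.Set.ofList (f.map (·.1))) (fun k => k)
      (fun k => PySem.Set.ofList ((f.lookup k).getD []))
      (PySem.Dict.empty : PySem.Dict String (PySem.Set Int))
      (by intro a _; simp [PySem.Dict.contains_empty])
      (by simpa using hndfks)
    simpa [PySem.Dict.items] using this
  have hkeys1 : ((PySem.Set.ofList (f.map (·.1))).foldl
        (fun d k => d.insert k (PySem.Set.ofList ((f.lookup k).getD [])))
        (PySem.Dict.empty : PySem.Dict String (PySem.Set Int))).keys
      = PySem.Set.ofList (f.map (·.1)) := by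
    show (_ : PySem.Dict String (PySem.Set Int)).items.map Prod.fst = _
    rw [h1, List.map_map]
    simp [Function.comp_def]
  have hnd1 : ((PySem.Set.ofList (f.map (·.1))).foldl
        (fun d k => d.insert k (PySem.Set.ofList ((f.lookup k).getD [])))
        (PySem.Dict.empty : PySem.Dict String (PySem.Set Int))).keys.Nodup := by
    rw [hkeys1]; exact hndfks
  have hcont1 : ∀ x, ((PySem.Set.ofList (f.map (·.1))).foldl
        (fun d k => d.insert k (PySem.Set.ofList ((f.lookup k).getD [])))
        (PySem.Dict.empty : PySem.Dict String (PySem.Set Int))).contains x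
      = decide (x ∈ PySem.Set.ofList (f.map (·.1))) := by
    intro x
    rw [PySem.Dict.contains_eq_decide_mem_keys, hkeys1]
  have hstepeq : (fun (d : PySem.Dict String (PySem.Set Int)) (k : String) =>
      if !(d.contains k) then d.insert k (PySem.Set.ofList ((b.lookup k).getD []))
      else d.modify k [] (fun s => PySem.Set.update s ((b.lookup k).getD []))) = pvStepA b := rfl
  rw [hstepeq, pv_loop2 b _ hndbks _ hnd1, h1, List.map_map]
  -- ---------- B's side ----------
  have hBstep : (fun (d : PySem.Dict String (List Int)) (p : String × List Int) =>
      (d.setdefault p.1 []).modify p.1 [] (fun vs => vs ++ p.2)) = pvStepB := rfl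
  rw [hBstep]
  have hitemsFkeys : ((pvItemsB f).map Prod.fst).Nodup := by
    unfold pvItemsB
    rw [List.map_map]
    simpa [Function.comp_def] using hndfks
  have hitemsBkeys : ((pvItemsB b).map Prod.fst).Nodup := by
    unfold pvItemsB
    rw [List.map_map]
    simpa [Function.comp_def] using hndbks
  have hg1 : ((pvItemsB f).foldl pvStepB
        (PySem.Dict.empty : PySem.Dict String (List Int))).items = pvItemsB f := by
    rw [pv_group (pvItemsB f) hitemsFkeys _ PySem.Dict.nodup_keys_empty]
    simp [PySem.Dict.contains_empty, PySem.Dict.items, PySem.Dict.empty]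
  have hg1keys : ((pvItemsB f).foldl pvStepB
        (PySem.Dict.empty : PySem.Dict String (List Int))).keys
      = PySem.Set.ofList (f.map (·.1)) := by
    show (_ : PySem.Dict String (List Int)).items.map Prod.fst = _
    rw [hg1]
    unfold pvItemsB
    rw [List.map_map]
    simp [Function.comp_def]
  have hg1nd : ((pvItemsB f).foldl pvStepB
        (PySem.Dict.empty : PySem.Dict String (List Int))).keys.Nodup := by
    rw [hg1keys]; exact hndfks
  have hgitems : ((pvItemsB f ++ pvItemsB b).foldl pvStepB
        (PySem.Dict.empty : PySem.Dict String (List Int))).items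
      = (PySem.Set.ofList (f.map (·.1))).map
          (fun k => if k ∈ PySem.Set.ofList (b.map (·.1))
            then (k, (f.lookup k).getD [] ++ (b.lookup k).getD [])
            else (k, (f.lookup k).getD []))
        ++ ((PySem.Set.ofList (b.map (·.1))).filter
              (fun k => !(decide (k ∈ PySem.Set.ofList (f.map (·.1)))))).map
            (fun k => (k, (b.lookup k).getD [])) := by
    rw [List.foldl_append, pv_group (pvItemsB b) hitemsBkeys _ hg1nd, hg1]
    congr 1
    · show ((pvItemsB f).map _) = _
      unfold pvItemsB
      rw [List.map_map]
      apply List.map_congr_left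
      intro k _
      simp only [Function.comp_def]
      rw [pv_lookup_map (PySem.Set.ofList (b.map (·.1))) (fun k => (b.lookup k).getD []) k]
      by_cases hkb : k ∈ PySem.Set.ofList (b.map (·.1))
      · simp [hkb]
      · simp [hkb]

    · have hfilteq : (pvItemsB b).filter
          (fun p => !(((pvItemsB f).foldl pvStepB
            (PySem.Dict.empty : PySem.Dict String (List Int))).contains p.1))
        = (pvItemsB b).filter
            (fun p => !(decide (p.1 ∈ PySem.Set.ofList (f.map (·.1))))) := by
        apply List.filter_congr
        intro x _
        rw [PySem.Dict.contains_eq_decide_mem_keys, hg1keys]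
      rw [hfilteq]
      unfold pvItemsB
      rw [List.filter_map]
      simp [Function.comp_def]
  have hmf : ((PySem.Set.ofList (f.map (·.1))).map
        (fun k => if k ∈ PySem.Set.ofList (b.map (·.1))
          then (k, (f.lookup k).getD [] ++ (b.lookup k).getD [])
          else (k, (f.lookup k).getD []))).map Prod.fst
      = PySem.Set.ofList (f.map (·.1)) := by
    rw [List.map_map]
    refine (List.map_congr_left (g := id) ?_).trans (List.map_id _)
    intro k _
    by_cases hkb : k ∈ PySem.Set.ofList (b.map (·.1)) <;> simp [Function.comp_def, hkb]
  have hgkeysnd : (((pvItemsB f ++ pvItemsB b).foldl pvStepB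
        (PySem.Dict.empty : PySem.Dict String (List Int))).items.map Prod.fst).Nodup := by
    rw [hgitems, List.map_append, hmf, List.map_map]
    have e2 : (((PySem.Set.ofList (b.map (·.1))).filter
          (fun k => !(decide (k ∈ PySem.Set.ofList (f.map (·.1)))))).map
          (Prod.fst ∘ fun k => (k, (b.lookup k).getD [])))
        = (PySem.Set.ofList (b.map (·.1))).filter
            (fun k => !(decide (k ∈ PySem.Set.ofList (f.map (·.1))))) := by
      simp [Function.comp_def]
    rw [e2]
    refine List.Nodup.append hndfks (hndbks.filter _) ?_
    intro x hx1 hx2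
    have := (List.mem_filter.mp hx2).2
    simp [hx1] at this
  have hfinal : ((((pvItemsB f ++ pvItemsB b).foldl pvStepB
          (PySem.Dict.empty : PySem.Dict String (List Int))).items).foldl
        (fun d p => d.insert p.1 (PySem.Set.ofList p.2))
        (PySem.Dict.empty : PySem.Dict String (PySem.Set Int))).items
      = (((pvItemsB f ++ pvItemsB b).foldl pvStepB
          (PySem.Dict.empty : PySem.Dict String (List Int))).items).map
          (fun p => (p.1, PySem.Set.ofList p.2)) := by
    have := PySem.Dict.items_foldl_insert_fresh
      (((pvItemsB f ++ pvItemsB b).foldl pvStepB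
          (PySem.Dict.empty : PySem.Dict String (List Int))).items) Prod.fst
      (fun p => PySem.Set.ofList p.2)
      (PySem.Dict.empty : PySem.Dict String (PySem.Set Int))
      (by intro a _; simp [PySem.Dict.contains_empty])
      hgkeysnd
    simpa [PySem.Dict.items] using this
  rw [hfinal, hgitems, List.map_append, List.map_map, List.map_map]
  -- ---------- match the two sides componentwise ----------
  congr 1
  · apply List.map_congr_left
    intro k _
    simp only [Function.comp_def]
    by_cases hkb : k ∈ PySem.Set.ofList (b.map (·.1))
    · rw [if_pos hkb, if_pos hkb]
      show (k, PySem.Set.update (PySem.Set.ofList ((f.lookup k).getD []))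
            ((b.lookup k).getD []))
          = (k, PySem.Set.ofList ((f.lookup k).getD [] ++ (b.lookup k).getD []))
      rw [PySem.Set.ofList_append]
    · rw [if_neg hkb, if_neg hkb]
  · have hfc : (PySem.Set.ofList (b.map (·.1))).filter
        (fun k => !(((PySem.Set.ofList (f.map (·.1))).foldl
          (fun d k => d.insert k (PySem.Set.ofList ((f.lookup k).getD [])))
          (PySem.Dict.empty : PySem.Dict String (PySem.Set Int))).contains k))
      = (PySem.Set.ofList (b.map (·.1))).filter
          (fun k => !(decide (k ∈ PySem.Set.ofList (f.map (·.1))))) := by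
      apply List.filter_congr
      intro x _
      rw [hcont1 x]
    rw [hfc]
    apply List.map_congr_left
    intro k _
    simp [Function.comp_def]
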